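-- pv_equiv track=rewrite | github.com/gerrylwk/matrix-info | create_matrix.py | find_powers_of_two
-- ===== SOURCE A (Python) =====
-- def find_powers_of_two(value):
--     """
--     Find which powers of 2 sum up to the given value using bit encoding.
--
--     Args:
--     - value: Integer value that is a sum of multiples of 2.
--
--     Returns:
--     - A list of integers representing the powers of 2 that sum up to the value.
--     """
--     powers_of_two = []
--     power = 0
--
--     while value > 0:
--         if value & 1:  # Check if the lowest bit is set
--             powers_of_two.append(2**power)
--         value >>= 1  # Right shift to check the next bit
--         power += 1
--
--     return powers_of_two
-- ===== SOURCE B (Python) =====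
-- def find_powers_of_two(value):
--     """Recursive doubling: halve the value, solve recursively, and double
--     every power in the sub-result, prepending 1 when the value is odd."""
--     if value <= 0:
--         return []
--     doubled = [2 * p for p in find_powers_of_two(value // 2)]
--     return [1] + doubled if value % 2 else doubled
-- ===== Notes on version B (the rewrite author's own statement) =====
-- stated objective: alternative
-- what changed: Replaces the iterative bit-shift loop with its explicit power counter by a halving recursion that doubles every power of the sub-result and prepends a unit power when the value is odd (no shift, no bit mask, no power counter).
import Mathlib
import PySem

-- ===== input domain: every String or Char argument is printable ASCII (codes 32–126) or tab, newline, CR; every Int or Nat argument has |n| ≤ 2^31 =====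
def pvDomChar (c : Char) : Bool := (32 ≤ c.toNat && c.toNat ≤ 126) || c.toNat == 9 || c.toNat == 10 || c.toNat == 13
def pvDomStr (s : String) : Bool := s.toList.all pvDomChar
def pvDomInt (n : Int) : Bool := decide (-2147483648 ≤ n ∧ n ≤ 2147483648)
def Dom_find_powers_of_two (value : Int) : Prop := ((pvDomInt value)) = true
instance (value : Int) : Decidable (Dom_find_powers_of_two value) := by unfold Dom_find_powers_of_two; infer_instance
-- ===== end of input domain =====

-- B replaces A's bit-shift loop (power counter, per-bit branch) by a halving recursion
-- that doubles every power of the sub-result; same return value, no speed claim (objective: alternative).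

-- ===== PORT A =====
-- A's while loop: state (value, power, powers_of_two); value >>= 1 strictly shrinks toNat while value > 0.
def find_powers_of_two_go (value : Int) (power : Nat) (powers_of_two : List Int) : List Int :=
  if h : value > 0 then
    let powers_of_two' :=
      if PySem.Int.band value 1 ≠ 0 then powers_of_two ++ [(2:Int) ^ power] else powers_of_two
    find_powers_of_two_go (value >>> (1:Nat)) (power + 1) powers_of_two'
  else powers_of_two
termination_by value.toNat
decreasing_by
  have : value >>> (1:Nat) = value / 2 := by
    match value with
    | Int.ofNat m =>
      rw [show (Int.ofNat m) >>> (1:Nat) = ((m >>> 1 : Nat) : Int) from rfl]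
      simp [Nat.shiftRight_one]
  omega

def find_powers_of_two (value : Int) : List Int :=
  find_powers_of_two_go value 0 []

-- ===== PORT B =====
def find_powers_of_two_alt (value : Int) : List Int :=
  if h : value ≤ 0 then []
  else
    let doubled := (find_powers_of_two_alt (PySem.Int.floordiv value 2)).map (fun p => 2 * p)
    if PySem.Int.mod value 2 ≠ 0 then 1 :: doubled else doubled
termination_by value.toNat
decreasing_by
  have : PySem.Int.floordiv value 2 = value / 2 :=
    PySem.Int.floordiv_eq_ediv_of_pos (by omega)
  omega

-- ===== PRECONDITION & SPEC =====
def Spec_find_powers_of_two (value : Int) (out : List Int) : Prop := out = find_powers_of_two_alt value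
instance (value : Int) (out : List Int) : Decidable (Spec_find_powers_of_two value out) := by unfold Spec_find_powers_of_two; infer_instance

-- ===== CLAIM (what is proved, stated in full; the proofs are below) =====
def Claim_equal_find_powers_of_two : Prop := ∀ (value : Int), Dom_find_powers_of_two value → Spec_find_powers_of_two value (find_powers_of_two value)

-- ===== LEMMAS AND PROOFS =====

theorem shiftRight_one_eq (v : Int) (h : 0 < v) : v >>> (1:Nat) = v / 2 := by
  match v with
  | Int.ofNat m =>
    rw [show (Int.ofNat m) >>> (1:Nat) = ((m >>> 1 : Nat) : Int) from rfl]
    simp [Nat.shiftRight_one]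

theorem band_one_eq (v : Int) (h : 0 < v) : PySem.Int.band v 1 = v % 2 := by
  rw [PySem.Int.band_of_nonneg (by omega) (by omega)]
  have h1 : v.toNat &&& (1:Int).toNat = v.toNat % 2 := Nat.and_one_is_mod _
  rw [h1]; omega

-- the accumulator is only ever appended to
theorem go_acc (v : Int) (p : Nat) (acc : List Int) :
    find_powers_of_two_go v p acc = acc ++ find_powers_of_two_go v p [] := by
  by_cases h : v > 0
  · conv_lhs => rw [find_powers_of_two_go]
    conv_rhs => rw [find_powers_of_two_go]
    simp only [h, dite_true]
    rw [go_acc (v >>> (1:Nat)) (p+1), go_acc (v >>> (1:Nat)) (p+1)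
          (if PySem.Int.band v 1 ≠ 0 then [] ++ [(2:Int) ^ p] else [])]
    split_ifs <;> simp
  · conv_lhs => rw [find_powers_of_two_go]
    conv_rhs => rw [find_powers_of_two_go]
    simp [h]
termination_by v.toNat
decreasing_by
  all_goals
    have : v >>> (1:Nat) = v / 2 := shiftRight_one_eq v (by omega)
    omega

-- bumping the power counter doubles every emitted power
theorem go_power_succ (v : Int) (p : Nat) :
    find_powers_of_two_go v (p + 1) [] = (find_powers_of_two_go v p []).map (fun x => 2 * x) := by
  by_cases h : v > 0
  · conv_lhs => rw [find_powers_of_two_go]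
    conv_rhs => rw [find_powers_of_two_go]
    simp only [h, dite_true]
    rw [go_acc (v >>> (1:Nat)) (p+1+1), go_acc (v >>> (1:Nat)) (p+1)]
    rw [go_power_succ (v >>> (1:Nat)) (p+1)]
    split_ifs <;> simp [pow_succ, mul_comm]
  · conv_lhs => rw [find_powers_of_two_go]
    conv_rhs => rw [find_powers_of_two_go]
    simp [h]
termination_by v.toNat
decreasing_by
  all_goals
    have : v >>> (1:Nat) = v / 2 := shiftRight_one_eq v (by omega)
    omega

theorem main_eq (v : Int) : find_powers_of_two_go v 0 [] = find_powers_of_two_alt v := by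
  by_cases h : v > 0
  · conv_lhs => rw [find_powers_of_two_go]
    conv_rhs => rw [find_powers_of_two_alt]
    simp only [h, dite_true, show ¬ v ≤ 0 by omega, dite_false]
    rw [go_acc (v >>> (1:Nat)) 1, go_power_succ (v >>> (1:Nat)) 0]
    rw [shiftRight_one_eq v h, band_one_eq v h,
        main_eq (v / 2),
        PySem.Int.floordiv_eq_ediv_of_pos (show (0:Int) < 2 by norm_num),
        PySem.Int.mod_eq_emod_of_pos (show (0:Int) < 2 by norm_num)]
    split_ifs with h1 <;> simp_all
  · conv_lhs => rw [find_powers_of_two_go]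
    conv_rhs => rw [find_powers_of_two_alt]
    simp [h, show v ≤ 0 by omega]
termination_by v.toNat
decreasing_by
  omega

-- ===== VERDICT (by name: the statement is the Claim_ definition above) =====
theorem find_powers_of_two_spec : Claim_equal_find_powers_of_two := by
  intro value _
  unfold Spec_find_powers_of_two find_powers_of_two
  exact main_eq value
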